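-- pv_equiv track=rewrite | github.com/jpdotcom/comp_prog-archive | Auto_Upload_CodeChef/Practice/Priya and AND.py | bit_and
-- ===== SOURCE A (Python) =====
-- def bit_and(arr):
--
--
--     ans=0
--     freq={}
--     for e in arr:
--         if e not in freq:
--             freq[e]=0
--         freq[e]+=1
--
--     for e in arr:
--
--         freq[e]-=1
--
--         for key in freq:
--             if key&e==e:
--
--                 ans+=freq[key]
--     return ans
-- ===== SOURCE B (Python) =====
-- def bit_and(arr):
--     # One left-to-right pass: count, for each element, the earlier values that
--     # are AND-submasks of it, maintaining a running counter of the prefix.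
--     ans = 0
--     seen = {}
--     for e in arr:
--         for v, c in seen.items():
--             if v & e == v:
--                 ans += c
--         seen[e] = seen.get(e, 0) + 1
--     return ans
-- ===== Notes on version B (the rewrite author's own statement) =====
-- stated objective: alternative
-- what changed: single left-to-right pass that counts earlier submasks of each element against an incrementally built prefix counter, instead of A's two passes that prebuild the full counter and, per element, decrement it and rescan every key for supermasks
import Mathlib
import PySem

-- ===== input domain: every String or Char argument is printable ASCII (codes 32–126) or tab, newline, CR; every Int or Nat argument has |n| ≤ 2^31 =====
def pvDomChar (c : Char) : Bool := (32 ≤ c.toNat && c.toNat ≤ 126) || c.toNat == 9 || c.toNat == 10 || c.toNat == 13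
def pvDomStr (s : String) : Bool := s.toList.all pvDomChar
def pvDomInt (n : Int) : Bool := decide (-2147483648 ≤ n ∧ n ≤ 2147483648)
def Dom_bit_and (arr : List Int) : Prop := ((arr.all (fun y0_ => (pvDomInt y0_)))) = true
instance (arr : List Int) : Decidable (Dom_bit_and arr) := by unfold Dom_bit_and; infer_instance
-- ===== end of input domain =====

-- B does the count in a single left-to-right pass against a growing prefix counter,
-- instead of A's two passes over a prebuilt full counter (objective: alternative).

-- ===== PORT A =====
-- first loop body: 'if e not in freq: freq[e]=0' then 'freq[e]+=1'
def bitandBuildStep (d : PySem.Dict Int Int) (e : Int) : PySem.Dict Int Int :=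
  let d1 := if d.contains e then d else d.insert e 0
  d1.modify e 0 (· + 1)

-- second loop body: 'freq[e]-=1' then 'for key in freq: if key&e==e: ans+=freq[key]'
def bitandCountStep (st : Int × PySem.Dict Int Int) (e : Int) : Int × PySem.Dict Int Int :=
  let d := st.2.modify e 0 (· - 1)
  (d.keys.foldl (fun a key => if PySem.Int.band key e == e then a + d.getD key 0 else a) st.1, d)

def bit_and (arr : List Int) : Int :=
  let freq := arr.foldl bitandBuildStep PySem.Dict.empty
  (arr.foldl bitandCountStep (0, freq)).1

-- ===== PORT B =====
-- loop body: 'for v, c in seen.items(): if v&e==v: ans+=c' then 'seen[e]=seen.get(e,0)+1'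
def bitandAltStep (st : Int × PySem.Dict Int Int) (e : Int) : Int × PySem.Dict Int Int :=
  let a := st.2.items.foldl (fun a p => if PySem.Int.band p.1 e == p.1 then a + p.2 else a) st.1
  (a, st.2.insert e (st.2.getD e 0 + 1))

def bit_and_alt (arr : List Int) : Int :=
  (arr.foldl bitandAltStep (0, PySem.Dict.empty)).1

-- ===== PRECONDITION & SPEC =====
def Spec_bit_and (arr : List Int) (out : Int) : Prop := out = bit_and_alt arr
instance (arr : List Int) (out : Int) : Decidable (Spec_bit_and arr out) := by unfold Spec_bit_and; infer_instance

-- ===== CLAIM (what is proved, stated in full; the proofs are below) =====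
def Claim_equal_bit_and : Prop := ∀ (arr : List Int), Dom_bit_and arr → Spec_bit_and arr (bit_and arr)

-- ===== LEMMAS AND PROOFS =====

-- canonical count of pairs i<j with arr[i] & arr[j] == arr[i]
def pvPairCount : List Int → Int
  | [] => 0
  | e :: rest => ((rest.countP (fun k => PySem.Int.band k e == e)) : Int) + pvPairCount rest

lemma pv_sum_map_add {α : Type} (l : List α) (f g : α → Int) :
    (l.map (fun x => f x + g x)).sum = (l.map f).sum + (l.map g).sum := by
  induction l with
  | nil => simp
  | cons x l ih => simp [ih]; ring

lemma pv_sum_single (P : Int → Bool) (x : Int) :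
    ∀ (ks : List Int), ks.Nodup → x ∈ ks →
      (ks.map (fun k => if k = x then (if P k then (1:Int) else 0) else 0)).sum
        = (if P x then (1:Int) else 0) := by
  intro ks hnd hx
  induction ks with
  | nil => simp at hx
  | cons k ks ih =>
    rcases List.mem_cons.mp hx with h | h
    · have hnot : x ∉ ks := h ▸ (List.nodup_cons.mp hnd).1
      have hz : (ks.map (fun k' => if k' = x then (if P k' then (1:Int) else 0) else 0)).sum = 0 := by
        apply List.sum_eq_zero
        intro y hy
        rcases List.mem_map.mp hy with ⟨k', hk', rfl⟩
        have : k' ≠ x := fun h' => hnot (h' ▸ hk')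
        simp [this]
      simp [← h, hz]
    · have hk : k ≠ x := by
        rintro rfl; exact (List.nodup_cons.mp hnd).1 h
      simp only [List.map_cons, List.sum_cons, if_neg hk]
      rw [ih (List.nodup_cons.mp hnd).2 h]
      ring

lemma pv_sum_count (P : Int → Bool) (ks : List Int) (hnd : ks.Nodup) :
    ∀ (rest : List Int), (∀ x ∈ rest, x ∈ ks) →
      (ks.map (fun k => if P k then ((rest.count k : Int)) else 0)).sum
        = (rest.countP P : Int) := by
  intro rest
  induction rest with
  | nil => intro _; simp
  | cons x r ih =>
    intro hsub
    have hsub' : ∀ y ∈ r, y ∈ ks := fun y hy => hsub y (List.mem_cons_of_mem _ hy)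
    have hx : x ∈ ks := hsub x List.mem_cons_self
    have hfun : ∀ k ∈ ks, (if P k then (((x :: r).count k : Int)) else 0)
        = (if P k then ((r.count k : Int)) else 0)
          + (if k = x then (if P k then (1:Int) else 0) else 0) := by
      intro k _
      rw [List.count_cons]
      by_cases hp : P k <;> by_cases he : k = x
      · subst he; simp [hp]
      · have hbx : (x == k) = false := by
          simp only [beq_eq_false_iff_ne]; exact fun h => he h.symm
        simp [hp, hbx, he]
      · subst he; simp [hp]
      · simp [hp]
    calc (ks.map (fun k => if P k then (((x :: r).count k : Int)) else 0)).sum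
        = (ks.map (fun k => (if P k then ((r.count k : Int)) else 0)
            + (if k = x then (if P k then (1:Int) else 0) else 0))).sum := by
          congr 1; exact List.map_congr_left hfun
      _ = (ks.map (fun k => if P k then ((r.count k : Int)) else 0)).sum
            + (ks.map (fun k => if k = x then (if P k then (1:Int) else 0) else 0)).sum :=
          pv_sum_map_add _ _ _
      _ = (r.countP P : Int) + (if P x then (1:Int) else 0) := by
          rw [ih hsub', pv_sum_single P x ks hnd hx]
      _ = ((x :: r).countP P : Int) := by
          by_cases hp : P x <;> simp [hp]

-- the inner scan over the dict keys, abstractly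
lemma pv_inner_foldl (P : Int → Bool) (f : Int → Int) (ks : List Int) (a : Int) :
    ks.foldl (fun a k => if P k then a + f k else a) a
      = a + (ks.map (fun k => if P k then f k else 0)).sum := by
  have h : (fun (a : Int) (k : Int) => if P k then a + f k else a)
      = (fun (a : Int) (k : Int) => a + (if P k then f k else 0)) := by
    funext a k; by_cases hp : P k <;> simp [hp]
  rw [h, PySem.List.foldl_add]

lemma pv_build_step_eq (d : PySem.Dict Int Int) (e : Int) :
    bitandBuildStep d e = d.modify e 0 (· + 1) := by
  unfold bitandBuildStep
  by_cases h : d.contains e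
  · simp [h]
  · have h' : d.contains e = false := by simpa using h
    have hg : d.getD e 0 = 0 := PySem.Dict.getD_of_not_contains d 0 h'
    simp [h', PySem.Dict.modify, PySem.Dict.getD_insert_self,
      PySem.Dict.insert_insert_self, hg]

lemma pv_build_eq_counter (arr : List Int) :
    arr.foldl bitandBuildStep PySem.Dict.empty = PySem.Dict.counter arr := by
  rw [PySem.Dict.counter_eq_foldl]
  congr 1
  funext d e
  exact pv_build_step_eq d e

-- count facts after the decrement 'freq[e] -= 1' with e::rest remaining
lemma pv_dec_getD (d : PySem.Dict Int Int) (e : Int) (rest : List Int)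
    (hcnt : ∀ v, d.getD v 0 = ((e :: rest).count v : Int)) :
    ∀ v, (d.modify e 0 (· - 1)).getD v 0 = (rest.count v : Int) := by
  intro v
  rw [PySem.Dict.getD_modify]
  by_cases hv : v = e
  · subst hv
    rw [if_pos rfl, hcnt v]
    simp
  · rw [if_neg hv, hcnt v]
    have : (e == v) = false := by
      simp only [beq_eq_false_iff_ne]; exact fun h => hv h.symm
    simp [List.count_cons, this]

lemma pv_dec_keys (d : PySem.Dict Int Int) (e : Int) (he : e ∈ d.keys) :
    (d.modify e 0 (· - 1)).keys = d.keys := by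
  rw [PySem.Dict.keys_modify]
  exact PySem.Dict.keys_insert_of_contains _ _
    ((PySem.Dict.contains_iff_mem_keys d e).mpr he)

lemma pv_A_loop : ∀ (l : List Int) (d : PySem.Dict Int Int) (a : Int),
    d.keys.Nodup → (∀ x ∈ l, x ∈ d.keys) →
    (∀ v, d.getD v 0 = (l.count v : Int)) →
    (l.foldl bitandCountStep (a, d)).1 = a + pvPairCount l := by
  intro l
  induction l with
  | nil => intro d a _ _ _; simp [pvPairCount]
  | cons e rest ih =>
    intro d a hnd hmem hcnt
    simp only [List.foldl_cons]
    have hkeys : (d.modify e 0 (· - 1)).keys = d.keys :=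
      pv_dec_keys d e (hmem e List.mem_cons_self)
    have hgd : ∀ v, (d.modify e 0 (· - 1)).getD v 0 = (rest.count v : Int) :=
      pv_dec_getD d e rest hcnt
    have hstep : bitandCountStep (a, d) e
        = (a + (rest.countP (fun k => PySem.Int.band k e == e) : Int), d.modify e 0 (· - 1)) := by
      unfold bitandCountStep
      simp only
      have hfun : (fun (a : Int) (key : Int) =>
            if PySem.Int.band key e == e then a + (d.modify e 0 (· - 1)).getD key 0 else a)
          = (fun (a : Int) (key : Int) =>
            if PySem.Int.band key e == e then a + (rest.count key : Int) else a) := by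
        funext a k; rw [hgd k]
      rw [hfun, hkeys,
        pv_inner_foldl (fun k => PySem.Int.band k e == e) (fun k => (rest.count k : Int)) d.keys a,
        pv_sum_count (fun k => PySem.Int.band k e == e) d.keys hnd rest
          (fun x hx => hmem x (List.mem_cons_of_mem _ hx))]
    rw [hstep]
    rw [ih _ _ (hkeys ▸ hnd)
      (fun x hx => hkeys ▸ hmem x (List.mem_cons_of_mem _ hx)) hgd]
    simp [pvPairCount]; ring

lemma pv_A_eq (arr : List Int) : bit_and arr = pvPairCount arr := by
  unfold bit_and
  simp only [pv_build_eq_counter]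
  rw [pv_A_loop arr (PySem.Dict.counter arr) 0
    (PySem.Dict.nodup_keys_counter arr)
    (fun x hx => by rw [PySem.Dict.keys_counter]; exact (PySem.Set.mem_ofList _ _).mpr hx)
    (fun v => PySem.Dict.getD_counter arr v)]
  ring

-- B-side prefix count
def pvPrefCount (pref : List Int) : List Int → Int
  | [] => 0
  | e :: rest => ((pref.countP (fun v => PySem.Int.band v e == v)) : Int) + pvPrefCount (pref ++ [e]) rest

lemma pv_counter_snoc (pref : List Int) (e : Int) :
    (PySem.Dict.counter pref).insert e ((PySem.Dict.counter pref).getD e 0 + 1)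
      = PySem.Dict.counter (pref ++ [e]) := by
  rw [PySem.Dict.counter_append_singleton]
  rfl

lemma pv_B_loop : ∀ (l : List Int) (pref : List Int) (a : Int),
    (l.foldl bitandAltStep (a, PySem.Dict.counter pref)).1 = a + pvPrefCount pref l := by
  intro l
  induction l with
  | nil => intro pref a; simp [pvPrefCount]
  | cons e rest ih =>
    intro pref a
    simp only [List.foldl_cons]
    have hstep : bitandAltStep (a, PySem.Dict.counter pref) e
        = (a + (pref.countP (fun v => PySem.Int.band v e == v) : Int),
           PySem.Dict.counter (pref ++ [e])) := by
      unfold bitandAltStep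
      simp only
      rw [pv_counter_snoc, PySem.Dict.items_counter, List.foldl_map]
      simp only
      rw [pv_inner_foldl (fun v => PySem.Int.band v e == v) (fun k => ((List.count k pref : Nat) : Int))
        (PySem.Set.ofList pref) a,
        pv_sum_count (fun v => PySem.Int.band v e == v) (PySem.Set.ofList pref)
          (PySem.Set.nodup_ofList pref) pref (fun x hx => (PySem.Set.mem_ofList _ _).mpr hx)]
    rw [hstep, ih (pref ++ [e])]
    simp [pvPrefCount]; ring

lemma pv_pairCount_snoc : ∀ (l : List Int) (x : Int),
    pvPairCount (l ++ [x]) = pvPairCount l + (l.countP (fun u => PySem.Int.band u x == u) : Int) := by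
  intro l
  induction l with
  | nil => intro x; simp [pvPairCount]
  | cons y l ih =>
    intro x
    simp only [List.cons_append, pvPairCount, ih x, List.countP_append, List.countP_cons]
    have hcomm : (PySem.Int.band x y == y) = (PySem.Int.band y x == y) := by
      rw [PySem.Int.band_comm]
    simp only [List.countP_nil, hcomm]
    by_cases h : PySem.Int.band y x == y <;> simp [h] <;> omega
  
lemma pv_prefCount_eq : ∀ (l pref : List Int),
    pvPrefCount pref l = pvPairCount (pref ++ l) - pvPairCount pref := by
  intro l
  induction l with
  | nil => intro pref; simp [pvPrefCount]
  | cons e rest ih =>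
    intro pref
    simp only [pvPrefCount, ih (pref ++ [e]), List.append_assoc, List.singleton_append,
      pv_pairCount_snoc]
    ring

lemma pv_B_eq (arr : List Int) : bit_and_alt arr = pvPairCount arr := by
  unfold bit_and_alt
  have h0 : (PySem.Dict.empty : PySem.Dict Int Int) = PySem.Dict.counter ([] : List Int) := rfl
  rw [h0, pv_B_loop arr [] 0, pv_prefCount_eq arr []]
  simp [pvPairCount]

-- ===== VERDICT (by name: the statement is the Claim_ definition above) =====
theorem bit_and_spec : Claim_equal_bit_and := by
  intro arr _
  unfold Spec_bit_and
  rw [pv_A_eq, pv_B_eq]
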